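-- pv_equiv track=rewrite | github.com/Davidli1127/AKC_FBS | app.py | _get_unique_section_id
-- ===== SOURCE A (Python) =====
-- def _get_unique_section_id(sections, preferred_id):
--     """Get a unique section ID, using preferred_id if available, else find alternative."""
--     existing_ids = set(s.get('id') for s in sections)
--     if preferred_id not in existing_ids:
--         return preferred_id
--
--     for i in range(ord('A'), ord('Z') + 1):
--         alt_id = chr(i)
--         if alt_id not in existing_ids:
--             return alt_id
--     return f"{preferred_id}_1"
-- ===== SOURCE B (Python) =====
-- def _get_unique_section_id(sections, preferred_id):
--     """Get a unique section ID, using preferred_id if available, else find alternative."""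
--     existing_ids = {s.get('id') for s in sections}
--     if preferred_id not in existing_ids:
--         return preferred_id
--     available = set("ABCDEFGHIJKLMNOPQRSTUVWXYZ") - existing_ids
--     if available:
--         return min(available)
--     return f"{preferred_id}_1"
-- ===== Notes on version B (the rewrite author's own statement) =====
-- stated objective: simpler
-- what changed: Replaces A's ord('A')..ord('Z') scan with first-free membership test by a set difference (all uppercase letters minus the existing ids) followed by min(), which picks the same alphabetically-first free letter.
import Mathlib
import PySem

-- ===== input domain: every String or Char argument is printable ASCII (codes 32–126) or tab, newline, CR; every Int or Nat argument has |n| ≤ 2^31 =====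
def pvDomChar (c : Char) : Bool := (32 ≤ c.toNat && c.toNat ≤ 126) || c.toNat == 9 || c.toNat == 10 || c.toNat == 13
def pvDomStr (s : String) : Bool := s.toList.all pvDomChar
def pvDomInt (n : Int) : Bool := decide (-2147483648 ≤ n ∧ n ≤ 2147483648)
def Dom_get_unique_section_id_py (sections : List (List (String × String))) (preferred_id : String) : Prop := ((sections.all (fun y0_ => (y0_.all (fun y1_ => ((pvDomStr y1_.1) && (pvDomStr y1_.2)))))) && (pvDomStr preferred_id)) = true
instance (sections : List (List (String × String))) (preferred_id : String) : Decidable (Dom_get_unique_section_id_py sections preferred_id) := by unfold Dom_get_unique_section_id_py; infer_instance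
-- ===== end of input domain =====

-- B replaces A's ord('A')..ord('Z') scan for the first free letter by a set difference
-- (uppercase letters minus the existing ids) followed by min(); objective: simpler.


-- ===== PORT A =====
-- "for i in range(ord('A'), ord('Z') + 1): …" — structural recursion over the range list
def pvALoop (existing_ids : PySem.Set (Option String)) (preferred_id : String) : List Int → String
  | [] => preferred_id ++ "_1"
  | i :: rest =>
    let alt_id : String := String.mk [Char.ofNat i.toNat]   -- chr(i)
    if !(existing_ids.contains (some alt_id)) then alt_id
    else pvALoop existing_ids preferred_id rest

def get_unique_section_id_py (sections : List (List (String × String))) (preferred_id : String) : String :=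
  let existing_ids : PySem.Set (Option String) :=
    PySem.Set.ofList (sections.map (fun s => PySem.Dict.get? (PySem.Dict.mk s) "id"))
  if !(existing_ids.contains (some preferred_id)) then preferred_id
  else pvALoop existing_ids preferred_id (PySem.List.pyRange 65 91 1)

-- ===== PORT B =====
def get_unique_section_id_py_alt (sections : List (List (String × String))) (preferred_id : String) : String :=
  let existing_ids : PySem.Set (Option String) :=
    PySem.Set.ofList (sections.map (fun s => PySem.Dict.get? (PySem.Dict.mk s) "id"))
  if !(existing_ids.contains (some preferred_id)) then preferred_id
  else
    -- set("ABC…Z") - existing_ids : elementwise set difference, under the Option wrapping of s.get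
    let available : PySem.Set String :=
      (PySem.Set.ofList ("ABCDEFGHIJKLMNOPQRSTUVWXYZ".toList.map (fun c => String.mk [c]))).filter
        (fun a => !(existing_ids.contains (some a)))
    match PySem.List.min? available (fun x => x) with
    | some m => m
    | none => preferred_id ++ "_1"

-- ===== PRECONDITION & SPEC =====
def Spec_get_unique_section_id_py (sections : List (List (String × String))) (preferred_id : String) (out : String) : Prop := out = get_unique_section_id_py_alt sections preferred_id
instance (sections : List (List (String × String))) (preferred_id : String) (out : String) : Decidable (Spec_get_unique_section_id_py sections preferred_id out) := by unfold Spec_get_unique_section_id_py; infer_instance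

-- ===== CLAIM (what is proved, stated in full; the proofs are below) =====
def Claim_equal_get_unique_section_id_py : Prop := ∀ (sections : List (List (String × String))) (preferred_id : String), Dom_get_unique_section_id_py sections preferred_id → Spec_get_unique_section_id_py sections preferred_id (get_unique_section_id_py sections preferred_id)

-- ===== LEMMAS AND PROOFS =====

-- A's scan, rephrased over the list of letter strings it actually tests
def pvScan (ex : PySem.Set (Option String)) (p : String) : List String → String
  | [] => p ++ "_1"
  | c :: t => if !(ex.contains (some c)) then c else pvScan ex p t

def pvLetters : List String :=
  ["A","B","C","D","E","F","G","H","I","J","K","L","M",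
   "N","O","P","Q","R","S","T","U","V","W","X","Y","Z"]

theorem pvALoop_eq_scan (ex : PySem.Set (Option String)) (p : String) :
    pvALoop ex p (PySem.List.pyRange 65 91 1) = pvScan ex p pvLetters := rfl

theorem pvLetters_sorted : pvLetters.Pairwise (· < ·) := by
  apply List.IsChain.pairwise
  simp only [pvLetters, List.isChain_cons_cons, List.isChain_singleton,
    String.lt_iff_toList_lt, and_true]
  decide

-- first untried element of a strictly increasing list = min of the untried ones
theorem pvScan_eq_min (ex : PySem.Set (Option String)) (p : String) :
    ∀ cs : List String, cs.Pairwise (· < ·) →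
      pvScan ex p cs =
        (match PySem.List.min? (cs.filter (fun a => !(ex.contains (some a)))) (fun x => x) with
         | some m => m
         | none => p ++ "_1")
  | [], _ => rfl
  | c :: t, hs => by
    have ht := (List.pairwise_cons.mp hs).2
    have hlt := (List.pairwise_cons.mp hs).1
    rw [pvScan, List.filter_cons]
    cases h : ex.contains (some c)
    · simp only [Bool.not_false, if_true]
      rcases hm : PySem.List.min?
          (c :: t.filter (fun a => !(ex.contains (some a)))) (fun x => x) with _ | m
      · exact absurd ((PySem.List.min?_eq_none_iff _ _).mp hm) (List.cons_ne_nil _ _)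
      · have hmem := PySem.List.min?_mem hm
        have hle : m ≤ c := PySem.List.min?_isMin hm c (List.mem_cons_self ..)
        rcases List.mem_cons.mp hmem with h1 | h2
        · simp [h1]
        · have : c < m := hlt m (List.mem_of_mem_filter h2)
          exact absurd hle (not_le.mpr this)
    · simp only [Bool.not_true, Bool.false_eq_true, if_false]
      exact pvScan_eq_min ex p t ht

-- ===== VERDICT (by name: the statement is the Claim_ definition above) =====
theorem get_unique_section_id_py_spec : Claim_equal_get_unique_section_id_py := by
  intro sections preferred_id _
  unfold Spec_get_unique_section_id_py get_unique_section_id_py get_unique_section_id_py_alt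
  cases h : (PySem.Set.ofList
      (sections.map (fun s => PySem.Dict.get? (PySem.Dict.mk s) "id"))).contains (some preferred_id)
  · simp only [h, Bool.not_false, if_true]
  · simp only [h, Bool.not_true, Bool.false_eq_true, if_false]
    rw [pvALoop_eq_scan, pvScan_eq_min _ _ pvLetters pvLetters_sorted]
    rfl
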